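-- pv_equiv track=rewrite | github.com/sigamatakalani/SE_cos720_TNK | b_DataCleaning/preprocessor.py | joinEmailHeaderListsToString
-- ===== SOURCE A (Python) =====
-- def joinEmailHeaderListsToString(input, list, header, nextHeader, exludeHeader=None, alternativeNextHeader=None):
-- 	if exludeHeader is None:
-- 		headerResult = [i for i in input if header.lower() in i.lower() and "x-"+header.lower() not in i.lower()]
-- 		nextHeaderResult = [i for i in input if nextHeader.lower() in i.lower() and "x-"+nextHeader.lower() not in i.lower()]
-- 	else:
-- 		headerResult = [i for i in input if header.lower() in i.lower() and exludeHeader.lower() not in i.lower() and "x-"+header.lower() not in i.lower()]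
-- 		nextHeaderResult = [i for i in input if nextHeader.lower() in i.lower() and "x-"+nextHeader.lower() not in i.lower()]
--
-- 	if alternativeNextHeader is not None:
-- 		alternativeNextHeaderResult = [i for i in input if alternativeNextHeader.lower() in i.lower()]
--
-- 	if len(headerResult) > 0:
-- 		headerIndexInInput = input.index(headerResult[0])
--
-- 		if len(nextHeaderResult) > 0:
-- 			nextHeaderIndexInInput = input.index(nextHeaderResult[0])
-- 		elif alternativeNextHeader is not None and len(alternativeNextHeaderResult) > 0:
-- 			nextHeaderIndexInInput = input.index(alternativeNextHeaderResult[0])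
-- 		else:
-- 			nextHeaderIndexInInput = len(input)
--
-- 		for i in range(headerIndexInInput, nextHeaderIndexInInput):
-- 			input.pop(headerIndexInInput)
--
-- 		combinedHeader = ''.join(list)
-- 		input.insert(headerIndexInInput, combinedHeader)
--
-- 	return input
-- ===== SOURCE B (Python) =====
-- def joinEmailHeaderListsToString(input, list, header, nextHeader, exludeHeader=None, alternativeNextHeader=None):
--     # Same in-place mutation of `input` as the original (splice + insert).
--     lh = header.lower()
--     ln = nextHeader.lower()
--
--     def first_index(pred):
--         for k, line in enumerate(input):
--             if pred(line.lower()):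
--                 return k
--         return None
--
--     hIdx = first_index(lambda s: lh in s
--                        and (exludeHeader is None or exludeHeader.lower() not in s)
--                        and "x-" + lh not in s)
--     if hIdx is None:
--         return input
--     nIdx = first_index(lambda s: ln in s and "x-" + ln not in s)
--     if nIdx is None and alternativeNextHeader is not None:
--         nIdx = first_index(lambda s: alternativeNextHeader.lower() in s)
--     boundary = nIdx if nIdx is not None else len(input)
--     del input[hIdx:boundary]
--     input.insert(hIdx, ''.join(list))
--     return input
-- ===== Notes on version B (the rewrite author's own statement) =====
-- stated objective: faster
-- what changed: Replaces the three filtered-list builds plus .index lookups and the element-by-element pop loop with single short-circuiting first-index scans and one slice delete/insert.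
import Mathlib
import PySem

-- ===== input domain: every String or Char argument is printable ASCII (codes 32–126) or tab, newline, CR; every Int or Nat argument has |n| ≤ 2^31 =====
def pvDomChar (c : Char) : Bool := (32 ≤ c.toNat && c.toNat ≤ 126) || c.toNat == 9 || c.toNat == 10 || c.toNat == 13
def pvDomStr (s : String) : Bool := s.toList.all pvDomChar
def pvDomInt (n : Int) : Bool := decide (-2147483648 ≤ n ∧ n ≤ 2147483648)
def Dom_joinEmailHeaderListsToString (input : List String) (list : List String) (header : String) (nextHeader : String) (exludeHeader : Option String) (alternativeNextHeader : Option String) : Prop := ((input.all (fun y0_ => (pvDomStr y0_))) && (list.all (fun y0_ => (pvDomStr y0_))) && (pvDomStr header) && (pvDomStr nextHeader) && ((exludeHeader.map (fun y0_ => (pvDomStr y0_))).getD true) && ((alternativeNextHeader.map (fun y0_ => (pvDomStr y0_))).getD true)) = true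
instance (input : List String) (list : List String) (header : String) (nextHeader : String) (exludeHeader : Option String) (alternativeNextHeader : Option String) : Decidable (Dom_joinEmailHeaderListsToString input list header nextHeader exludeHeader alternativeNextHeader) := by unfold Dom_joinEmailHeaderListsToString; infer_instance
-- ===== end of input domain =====

-- ===== PORT A =====
-- B collapses the header block with single short-circuiting index scans instead of
-- building filtered lists and calling .index/.pop; same return value, same in-place net effect.

-- the three comprehension conditions of A, named (the exludeHeader check sits between the
-- two others exactly as in the source)
def headerPredA (header : String) (exludeHeader : Option String) (i : String) : Bool :=
  match exludeHeader with
  | none =>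
      PySem.Str.isIn (PySem.Str.lower header) (PySem.Str.lower i) &&
      !(PySem.Str.isIn ("x-" ++ PySem.Str.lower header) (PySem.Str.lower i))
  | some ex =>
      PySem.Str.isIn (PySem.Str.lower header) (PySem.Str.lower i) &&
      !(PySem.Str.isIn (PySem.Str.lower ex) (PySem.Str.lower i)) &&
      !(PySem.Str.isIn ("x-" ++ PySem.Str.lower header) (PySem.Str.lower i))

def nextPredA (nextHeader : String) (i : String) : Bool :=
  PySem.Str.isIn (PySem.Str.lower nextHeader) (PySem.Str.lower i) &&
  !(PySem.Str.isIn ("x-" ++ PySem.Str.lower nextHeader) (PySem.Str.lower i))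

def altPredA (a : String) (i : String) : Bool :=
  PySem.Str.isIn (PySem.Str.lower a) (PySem.Str.lower i)

-- A pops at a fixed position; Python .pop here never raises (the index stays valid),
-- so the `none` branch of pop? is unreachable and only keeps the step total.
def popStepA (hIdx : Nat) (st : List String) : List String :=
  match PySem.List.pop? st (hIdx : Int) with
  | some (_, rest) => rest
  | none => st

def joinEmailHeaderListsToString (input : List String) (list : List String) (header : String) (nextHeader : String) (exludeHeader : Option String) (alternativeNextHeader : Option String) : List String :=
  let headerResult : List String := input.filter (headerPredA header exludeHeader)
  let nextHeaderResult : List String := input.filter (nextPredA nextHeader)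
  -- in Python this variable only exists when alternativeNextHeader is not None; it is
  -- only read under that same guard, so [] for the none case is never consulted
  let alternativeNextHeaderResult : List String :=
    match alternativeNextHeader with
    | some a => input.filter (altPredA a)
    | none => []
  if headerResult.length > 0 then
    -- input.index(v): v comes from a filter of input, so index? is always `some`
    let headerIndexInInput : Nat := (PySem.List.index? input (headerResult.headD "")).getD 0
    let nextHeaderIndexInInput : Nat :=
      if nextHeaderResult.length > 0 then
        (PySem.List.index? input (nextHeaderResult.headD "")).getD 0
      else if alternativeNextHeader.isSome && alternativeNextHeaderResult.length > 0 then
        (PySem.List.index? input (alternativeNextHeaderResult.headD "")).getD 0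
      else input.length
    let popped :=
      (PySem.List.pyRange (headerIndexInInput : Int) (nextHeaderIndexInInput : Int) 1).foldl
        (fun st _ => popStepA headerIndexInInput st) input
    let combinedHeader := PySem.Str.join "" list
    PySem.List.insert popped (headerIndexInInput : Int) combinedHeader
  else input

-- ===== PORT B =====
-- the lambdas handed to B's first_index (which is List.findIdx? on input)
def headerPredB (header : String) (exludeHeader : Option String) (i : String) : Bool :=
  let s := PySem.Str.lower i
  PySem.Str.isIn (PySem.Str.lower header) s &&
  (match exludeHeader with
   | none => true
   | some ex => !(PySem.Str.isIn (PySem.Str.lower ex) s)) &&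
  !(PySem.Str.isIn ("x-" ++ PySem.Str.lower header) s)

def nextPredB (nextHeader : String) (i : String) : Bool :=
  let s := PySem.Str.lower i
  PySem.Str.isIn (PySem.Str.lower nextHeader) s &&
  !(PySem.Str.isIn ("x-" ++ PySem.Str.lower nextHeader) s)

def altPredB (a : String) (i : String) : Bool :=
  PySem.Str.isIn (PySem.Str.lower a) (PySem.Str.lower i)

def joinEmailHeaderListsToString_alt (input : List String) (list : List String) (header : String) (nextHeader : String) (exludeHeader : Option String) (alternativeNextHeader : Option String) : List String :=
  match List.findIdx? (headerPredB header exludeHeader) input with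
  | none => input
  | some hIdx =>
    let nIdx? : Option Nat :=
      match List.findIdx? (nextPredB nextHeader) input, alternativeNextHeader with
      | none, some a => List.findIdx? (altPredB a) input
      | o, _ => o
    let boundary : Nat := nIdx?.getD input.length
    -- del input[hIdx:boundary]  (hIdx < len, boundary <= len: the slice delete is take/drop)
    let pruned := input.take hIdx ++ input.drop (max hIdx boundary)
    PySem.List.insert pruned (hIdx : Int) (PySem.Str.join "" list)

-- ===== PRECONDITION & SPEC =====
def Spec_joinEmailHeaderListsToString (input : List String) (list : List String) (header : String) (nextHeader : String) (exludeHeader : Option String) (alternativeNextHeader : Option String) (out : List String) : Prop := out = joinEmailHeaderListsToString_alt input list header nextHeader exludeHeader alternativeNextHeader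
instance (input : List String) (list : List String) (header : String) (nextHeader : String) (exludeHeader : Option String) (alternativeNextHeader : Option String) (out : List String) : Decidable (Spec_joinEmailHeaderListsToString input list header nextHeader exludeHeader alternativeNextHeader out) := by unfold Spec_joinEmailHeaderListsToString; infer_instance

-- ===== CLAIM (what is proved, stated in full; the proofs are below) =====
def Claim_equal_joinEmailHeaderListsToString : Prop := ∀ (input : List String) (list : List String) (header : String) (nextHeader : String) (exludeHeader : Option String) (alternativeNextHeader : Option String), Dom_joinEmailHeaderListsToString input list header nextHeader exludeHeader alternativeNextHeader → Spec_joinEmailHeaderListsToString input list header nextHeader exludeHeader alternativeNextHeader (joinEmailHeaderListsToString input list header nextHeader exludeHeader alternativeNextHeader)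

-- ===== LEMMAS AND PROOFS =====

-- first element of `filter p` located with index? = first index satisfying p
theorem index?_filter_headD (p : String → Bool) (xs : List String)
    (h : xs.filter p ≠ []) :
    PySem.List.index? xs ((xs.filter p).headD "") = List.findIdx? p xs := by
  induction xs with
  | nil => simp at h
  | cons x xs ih =>
    by_cases hx : p x
    · rw [List.filter_cons_of_pos hx, List.headD_cons, PySem.List.index?_cons_self,
        List.findIdx?_cons, if_pos hx]
    · have hfil : (x :: xs).filter p = xs.filter p := List.filter_cons_of_neg hx
      have h' : xs.filter p ≠ [] := by rwa [hfil] at h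
      have hmem : (xs.filter p).headD "" ∈ xs.filter p := by
        cases hfe : xs.filter p with
        | nil => exact absurd hfe h'
        | cons a t => simp
      have hp : p ((xs.filter p).headD "") = true := (List.mem_filter.1 hmem).2
      have hne : x ≠ (xs.filter p).headD "" := by
        intro he; rw [← he] at hp; exact hx hp
      rw [hfil, PySem.List.index?_cons_of_ne _ hne, List.findIdx?_cons,
        if_neg (by simp [hx]), ih h']

theorem filter_nil_iff_findIdx?_none (p : String → Bool) (xs : List String) :
    xs.filter p = [] ↔ List.findIdx? p xs = none := by
  simp [List.filter_eq_nil_iff, List.findIdx?_eq_none_iff]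

theorem findIdx?_lt_length {α : Type} {p : α → Bool} {xs : List α} {k : Nat}
    (h : List.findIdx? p xs = some k) : k < xs.length :=
  (List.findIdx?_eq_some_iff_findIdx_eq.1 h).1

-- k pops at position h = deleting xs[h : h+k]
theorem iterate_popStepA (h k : Nat) (xs : List String) (hk : h + k ≤ xs.length) :
    (popStepA h)^[k] xs = xs.take h ++ xs.drop (h + k) := by
  induction k generalizing xs with
  | zero => simp
  | succ k ih =>
    have hh : h < xs.length := by omega
    have hstep : popStepA h xs = xs.take h ++ xs.drop (h + 1) := by
      simp [popStepA, PySem.List.pop?_natCast xs h hh, List.eraseIdx_eq_take_drop_succ]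
    have hlt : (xs.take h).length = h := by simp [List.length_take]; omega
    rw [Function.iterate_succ_apply, hstep,
      ih _ (by simp [List.length_take, List.length_drop]; omega)]
    have h1 : (xs.take h ++ xs.drop (h + 1)).take h = xs.take h := by
      rw [List.take_append_of_le_length (by omega), List.take_take]
      simp
    have h2 : (xs.take h ++ xs.drop (h + 1)).drop (h + k) = xs.drop (h + 1 + k) := by
      rw [List.drop_append, hlt, List.drop_drop]
      have hd : List.drop (h + k) (List.take h xs) = [] := by
        simp [List.drop_eq_nil_iff, hlt]
      rw [hd, List.nil_append]
      congr 1
      omega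
    rw [h1, h2]
    have he : h + 1 + k = h + (k + 1) := by omega
    rw [he]

-- both sides, after the first index h is known, splice to take h ++ join :: drop (max h n)
theorem splice_eq (input : List String) (h n : Nat) (cj : String)
    (hh : h < input.length) (hn : n ≤ input.length) :
    PySem.List.insert
      ((PySem.List.pyRange (h : Int) (n : Int) 1).foldl (fun st _ => popStepA h st) input)
      (h : Int) cj
    = PySem.List.insert (input.take h ++ input.drop (max h n)) (h : Int) cj := by
  rw [List.foldl_const, PySem.List.length_pyRange_one]
  have hcast : ((n : Int) - (h : Int)).toNat = n - h := by omega
  rw [hcast, iterate_popStepA h (n - h) input (by omega)]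
  have : h + (n - h) = max h n := by omega
  rw [this]

theorem predH_eq (header : String) (ex : Option String) :
    headerPredB header ex = headerPredA header ex := by
  funext i
  cases ex with
  | none => simp [headerPredA, headerPredB]
  | some e => simp [headerPredA, headerPredB, Bool.and_assoc]

theorem predN_eq (nextHeader : String) : nextPredB nextHeader = nextPredA nextHeader := rfl

theorem predAlt_eq (a : String) : altPredB a = altPredA a := rfl

-- locate the first element of `filter p` in xs: the getD never fires, the value is findIdx?
theorem getD_index?_filter (p : String → Bool) (xs : List String) (k : Nat)
    (h : List.findIdx? p xs = some k) :
    (PySem.List.index? xs ((xs.filter p).headD "")).getD 0 = k := by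
  have hne : xs.filter p ≠ [] := by
    intro hnil
    rw [(filter_nil_iff_findIdx?_none p xs).1 hnil] at h
    simp at h
  rw [index?_filter_headD p xs hne, h, Option.getD_some]

theorem filter_pos_of_findIdx? (p : String → Bool) (xs : List String) (k : Nat)
    (h : List.findIdx? p xs = some k) : (xs.filter p).length > 0 := by
  rcases hc : xs.filter p with _ | ⟨b, t⟩
  · rw [(filter_nil_iff_findIdx?_none p xs).1 hc] at h
    simp at h
  · simp

theorem filter_nonpos_of_findIdx? (p : String → Bool) (xs : List String)
    (h : List.findIdx? p xs = none) : ¬ (xs.filter p).length > 0 := by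
  rw [← filter_nil_iff_findIdx?_none] at h
  simp [h]

theorem main_eq (input list : List String) (header nextHeader : String)
    (ex alt : Option String) :
    joinEmailHeaderListsToString input list header nextHeader ex alt
      = joinEmailHeaderListsToString_alt input list header nextHeader ex alt := by
  simp only [joinEmailHeaderListsToString, joinEmailHeaderListsToString_alt,
    predH_eq, predN_eq, predAlt_eq]
  cases hH : List.findIdx? (headerPredA header ex) input with
  | none =>
    rw [if_neg (filter_nonpos_of_findIdx? _ _ hH)]
  | some h =>
    rw [if_pos (filter_pos_of_findIdx? _ _ _ hH), getD_index?_filter _ _ _ hH]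
    have hh : h < input.length := findIdx?_lt_length hH
    cases hN : List.findIdx? (nextPredA nextHeader) input with
    | some n =>
      rw [if_pos (filter_pos_of_findIdx? _ _ _ hN), getD_index?_filter _ _ _ hN]
      have hB : (match (some n : Option Nat), alt with
          | none, some a => List.findIdx? (altPredA a) input
          | o, _ => o) = some n := by
        cases alt <;> rfl
      rw [hB, Option.getD_some]
      exact splice_eq input h n _ hh (Nat.le_of_lt (findIdx?_lt_length hN))
    | none =>
      rw [if_neg (filter_nonpos_of_findIdx? _ _ hN)]
      cases alt with
      | none =>
        rw [if_neg (by simp)]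
        exact splice_eq input h input.length _ hh (Nat.le_refl _)
      | some a =>
        simp only [Option.isSome_some, Bool.true_and]
        cases hA : List.findIdx? (altPredA a) input with
        | some m =>
          rw [if_pos (by simp [filter_pos_of_findIdx? _ _ _ hA]),
            getD_index?_filter _ _ _ hA, Option.getD_some]
          exact splice_eq input h m _ hh (Nat.le_of_lt (findIdx?_lt_length hA))
        | none =>
          rw [if_neg (by simpa using filter_nonpos_of_findIdx? _ _ hA)]
          exact splice_eq input h input.length _ hh (Nat.le_refl _)

-- ===== VERDICT (by name: the statement is the Claim_ definition above) =====
theorem joinEmailHeaderListsToString_spec : Claim_equal_joinEmailHeaderListsToString := by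
  intro input list header nextHeader exludeHeader alternativeNextHeader _
  unfold Spec_joinEmailHeaderListsToString
  exact main_eq input list header nextHeader exludeHeader alternativeNextHeader
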